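-- pv_equiv track=rewrite | github.com/missmagenta/find-hidden-messages-in-dna | 11_salmonella_ori.py | skew_position
-- ===== SOURCE A (Python) =====
-- def skew_position(text):
--     skew_list = [0]
--     for i in range(len(text)):
--         if text[i] == 'C':
--             skew_list.append(skew_list[i] - 1)
--         elif text[i] == 'G':
--             skew_list.append(skew_list[i] + 1)
--         else:
--             skew_list.append(skew_list[i])
--     return skew_list
-- ===== SOURCE B (Python) =====
-- def skew_position(text):
--     out = []
--     val = 0
--     prev = 0
--     for j, c in enumerate(text):
--         if c == 'G' or c == 'C':
--             out.extend([val] * (j - prev + 1))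
--             val += 1 if c == 'G' else -1
--             prev = j + 1
--     out.extend([val] * (len(text) - prev + 1))
--     return out
-- ===== Notes on version B (the rewrite author's own statement) =====
-- stated objective: alternative
-- what changed: B iterates over G/C events only: between consecutive skew-changing characters it emits a constant run via list replication, instead of A's per-character append that re-reads skew_list[i]; the output is built as concatenated constant segments, not one running-sum entry at a time.
import Mathlib
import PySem

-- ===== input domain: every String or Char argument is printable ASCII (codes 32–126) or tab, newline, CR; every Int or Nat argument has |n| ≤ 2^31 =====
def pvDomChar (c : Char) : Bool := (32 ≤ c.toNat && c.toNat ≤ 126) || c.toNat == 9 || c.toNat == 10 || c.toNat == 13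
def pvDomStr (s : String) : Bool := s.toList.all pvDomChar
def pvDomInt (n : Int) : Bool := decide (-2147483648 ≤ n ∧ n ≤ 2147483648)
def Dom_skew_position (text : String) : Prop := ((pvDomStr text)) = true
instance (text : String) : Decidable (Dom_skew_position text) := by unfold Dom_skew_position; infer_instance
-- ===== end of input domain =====

-- B rebuilds the skew array from G/C events only, emitting constant runs by replication between events (alternative decomposition; same asymptotic cost).

-- ===== PORT A =====
def skew_position (text : String) : List Int :=
  (PySem.List.pyRange 0 (PySem.Str.len text) 1).foldl
    (fun acc i =>
      if PySem.Str.pyGet? text i = some 'C' then acc ++ [PySem.List.pyGetD acc i 0 - 1]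
      else if PySem.Str.pyGet? text i = some 'G' then acc ++ [PySem.List.pyGetD acc i 0 + 1]
      else acc ++ [PySem.List.pyGetD acc i 0])
    [0]

-- ===== PORT B =====
-- Source B's `for j, c in enumerate(text)` loop, transcribed as structural recursion
-- carrying the enumerate index j and the state (out, val, prev); j and prev are
-- naturals (Python's enumerate indices are nonnegative, prev ≤ j throughout, so
-- Nat subtraction in the replicate counts matches Python's).
def skewLoop : List Char → Nat → (List Int × Int × Nat) → (List Int × Int × Nat)
  | [], _, s => s
  | c :: rest, j, (out, val, prev) =>
      if c = 'G' ∨ c = 'C' then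
        skewLoop rest (j + 1)
          (out ++ List.replicate (j - prev + 1) val,
           val + (if c = 'G' then 1 else -1), j + 1)
      else
        skewLoop rest (j + 1) (out, val, prev)

def skew_position_alt (text : String) : List Int :=
  match skewLoop text.toList 0 ([], 0, 0) with
  | (out, val, prev) => out ++ List.replicate (text.toList.length - prev + 1) val

-- ===== PRECONDITION & SPEC =====
def Spec_skew_position (text : String) (out : List Int) : Prop := out = skew_position_alt text
instance (text : String) (out : List Int) : Decidable (Spec_skew_position text out) := by unfold Spec_skew_position; infer_instance

-- ===== CLAIM (what is proved, stated in full; the proofs are below) =====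
def Claim_equal_skew_position : Prop := ∀ (text : String), Dom_skew_position text → Spec_skew_position text (skew_position text)

-- ===== LEMMAS AND PROOFS =====

def skewDelta (c : Char) : Int := if c = 'G' then 1 else if c = 'C' then -1 else 0

lemma foldl_add_sum (l : List Int) (a : Int) : l.foldl (· + ·) a = a + l.sum := by
  induction l generalizing a with
  | nil => simp
  | cons x l ih => simp [ih (a + x)]; ring

-- last entry of a running-sum scan is the start plus the total
lemma scanl_add_getD_length (l : List Int) (a : Int) :
    (List.scanl (· + ·) a l).getD l.length 0 = a + l.sum := by
  induction l generalizing a with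
  | nil => simp
  | cons x l ih => simp [List.scanl_cons, foldl_add_sum]; ring

lemma scanl_add_snoc (a : Int) (l : List Int) (x : Int) :
    List.scanl (· + ·) a (l ++ [x]) = List.scanl (· + ·) a l ++ [a + l.sum + x] := by
  induction l generalizing a with
  | nil => simp [List.scanl_cons]
  | cons y l ih => simp [List.scanl_cons, ih (a + y)]; ring

lemma scanl_dropLast_append_last (l : List Int) :
    (List.scanl (· + ·) 0 l).dropLast ++ [l.sum] = List.scanl (· + ·) 0 l := by
  induction l using List.reverseRecOn with
  | nil => simp
  | append_singleton l x _ => rw [scanl_add_snoc]; simp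

-- ===== A-side: A's append loop is the prefix-sum scan of the per-character deltas =====
lemma skew_loop_eq (cs : List Char) :
    ∀ n, n ≤ cs.length →
      (PySem.List.pyRange 0 (n : Int) 1).foldl
        (fun acc i =>
          if PySem.List.pyGet? cs i = some 'C' then acc ++ [PySem.List.pyGetD acc i 0 - 1]
          else if PySem.List.pyGet? cs i = some 'G' then acc ++ [PySem.List.pyGetD acc i 0 + 1]
          else acc ++ [PySem.List.pyGetD acc i 0])
        [0]
      = List.scanl (· + ·) 0 ((cs.take n).map skewDelta) := by
  intro n hn
  induction n with
  | zero => simp [PySem.List.pyRange_one_eq_nil, List.scanl]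
  | succ n ih =>
      have hn' : n ≤ cs.length := Nat.le_of_succ_le hn
      have hlt : n < cs.length := hn
      have hsplit : PySem.List.pyRange 0 ((n + 1 : Nat) : Int) 1
          = PySem.List.pyRange 0 (n : Int) 1 ++ [(n : Int)] := by
        have := PySem.List.pyRange_one_succ_right (a := 0) (b := (n : Int)) (by positivity)
        push_cast
        exact this
      rw [hsplit, List.foldl_append, ih hn']
      have hget : PySem.List.pyGet? cs (n : Int) = some cs[n] :=
        PySem.List.pyGet?_ofNat cs n hlt
      have hgetD : PySem.List.pyGetD
          (List.scanl (· + ·) 0 ((cs.take n).map skewDelta)) (n : Int) 0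
          = 0 + ((cs.take n).map skewDelta).sum := by
        have hlen : ((cs.take n).map skewDelta).length = n := by
          simp [List.length_take, Nat.min_eq_left hn']
        have hlast := scanl_add_getD_length ((cs.take n).map skewDelta) 0
        rw [hlen] at hlast
        rw [PySem.List.pyGetD_natCast, hlast]
      have htake : cs.take (n + 1) = cs.take n ++ [cs[n]] := by
        rw [List.take_add_one]
        simp [List.getElem?_eq_getElem hlt]
      rw [htake, List.map_append, List.map_singleton, scanl_add_snoc]
      simp only [List.foldl_cons, List.foldl_nil]
      rw [hget, hgetD]
      by_cases hC : cs[n] = 'C'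
      · simp [hC, skewDelta]; ring
      · by_cases hG : cs[n] = 'G'
        · simp [hG, skewDelta]
        · simp [hC, hG, skewDelta]

-- ===== B-side: the event loop also produces the prefix-sum scan =====
-- Invariant: out ++ (pending run of val) is the scan of the processed prefix
-- without its last entry, and val is the running total.
lemma skewLoop_correct (rest : List Char) :
    ∀ (pre : List Char) (out : List Int) (val : Int) (prev : Nat),
      prev ≤ pre.length →
      out ++ List.replicate (pre.length - prev) val
        = (List.scanl (· + ·) 0 (pre.map skewDelta)).dropLast →
      val = (pre.map skewDelta).sum →
      (match skewLoop rest pre.length (out, val, prev) with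
       | (o, v, p) =>
         o ++ List.replicate ((pre.length + rest.length) - p + 1) v
           = List.scanl (· + ·) 0 ((pre ++ rest).map skewDelta)) := by
  induction rest with
  | nil =>
      intro pre out val prev hle hout hval
      simp only [skewLoop, List.length_nil, Nat.add_zero, List.append_nil]
      rw [List.replicate_succ', ← List.append_assoc, hout, hval,
        scanl_dropLast_append_last (pre.map skewDelta)]
  | cons c rest ih =>
      intro pre out val prev hle hout hval
      have hlenpre : (pre ++ [c]).length = pre.length + 1 := by simp
      have hfull : out ++ List.replicate (pre.length - prev + 1) val
          = List.scanl (· + ·) 0 (pre.map skewDelta) := by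
        rw [List.replicate_succ', ← List.append_assoc, hout, hval,
          scanl_dropLast_append_last (pre.map skewDelta)]
      have hscan : List.scanl (· + ·) 0 ((pre ++ [c]).map skewDelta)
          = List.scanl (· + ·) 0 (pre.map skewDelta)
            ++ [0 + (pre.map skewDelta).sum + skewDelta c] := by
        rw [List.map_append, List.map_singleton, scanl_add_snoc]
      by_cases h : c = 'G' ∨ c = 'C'
      · simp only [skewLoop, if_pos h]
        have hd : (if c = 'G' then (1 : Int) else -1) = skewDelta c := by
          rcases h with h | h <;> simp [h, skewDelta]
        have := ih (pre ++ [c])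
          (out ++ List.replicate (pre.length - prev + 1) val)
          (val + (if c = 'G' then 1 else -1)) (pre.length + 1)
          (by simp)
          (by rw [hlenpre, Nat.sub_self, List.replicate_zero, List.append_nil,
                hfull, hscan, List.dropLast_concat])
          (by rw [hd, hval, List.map_append, List.map_singleton, List.sum_append,
                List.sum_singleton])
        rw [hlenpre] at this
        have harr : pre.length + 1 + rest.length = pre.length + (c :: rest).length := by
          simp; omega
        have happ : (pre ++ [c]) ++ rest = pre ++ (c :: rest) := by simp
        rw [harr, happ] at this
        exact this
      · simp only [skewLoop, if_neg h]
        push Not at h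
        have hδ : skewDelta c = 0 := by simp [skewDelta, h.1, h.2]
        have := ih (pre ++ [c]) out val prev
          (by simp; omega)
          (by rw [hlenpre, hscan, List.dropLast_concat, Nat.sub_add_comm hle]
              exact hfull)
          (by rw [hval, List.map_append, List.map_singleton, List.sum_append,
                List.sum_singleton, hδ, add_zero])
        rw [hlenpre] at this
        have harr : pre.length + 1 + rest.length = pre.length + (c :: rest).length := by
          simp; omega
        have happ : (pre ++ [c]) ++ rest = pre ++ (c :: rest) := by simp
        rw [harr, happ] at this
        exact this

-- A = scan, B = scan, hence A = B
lemma skew_alt_eq_scan (text : String) :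
    skew_position_alt text = List.scanl (· + ·) 0 (text.toList.map skewDelta) := by
  have h := skewLoop_correct text.toList [] [] 0 0 (by simp) (by simp) (by simp)
  simpa [skew_position_alt] using h

-- ===== VERDICT (by name: the statement is the Claim_ definition above) =====
theorem skew_position_spec : Claim_equal_skew_position := by
  intro text _
  unfold Spec_skew_position
  rw [skew_alt_eq_scan]
  unfold skew_position
  have h := skew_loop_eq text.toList text.toList.length le_rfl
  rw [List.take_length] at h
  simp only [pysem] at h ⊢
  exact h
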